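-- pv_equiv track=rewrite | github.com/MOHAMMED-KAIF-M/Clustering | cluster_images.py | build_detector_prompt_class_lookup
-- ===== SOURCE A (Python) =====
-- def prompt_text_to_label(prompt_text: str) -> str:
--     label = " ".join(str(prompt_text).strip().split())
--     if not label:
--         return ""
--
--     prefixes = (
--         "a real estate interior photo of ",
--         "a real estate exterior photo of ",
--         "a real estate photo of ",
--         "an interior photo of ",
--         "an exterior photo of ",
--         "an interior scene with ",
--         "an exterior scene with ",
--         "an ",
--         "a ",
--         "the ",
--     )
--     changed = True
--     while changed and label:
--         lowered = label.lower()
--         changed = False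
--         for prefix in prefixes:
--             if lowered.startswith(prefix):
--                 label = label[len(prefix) :].strip()
--                 changed = True
--                 break
--
--     return label.strip(" .")
--
-- def normalize_detector_label(label: str) -> str:
--     return " ".join(str(label).strip().lower().replace("_", " ").split())
--
-- def detector_label_aliases(label: str, alias_map: dict[str, tuple[str, ...]] | None = None) -> set[str]:
--     normalized = normalize_detector_label(label)
--     if not normalized:
--         return set()
--
--     aliases = {normalized}
--     if normalized.endswith("s") and len(normalized) > 3:
--         aliases.add(normalized[:-1])
--     elif not normalized.endswith("s"):
--         aliases.add(f"{normalized}s")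
--
--     for alias in (alias_map or {}).get(normalized, ()):
--         normalized_alias = normalize_detector_label(alias)
--         if not normalized_alias:
--             continue
--         aliases.add(normalized_alias)
--         if normalized_alias.endswith("s") and len(normalized_alias) > 3:
--             aliases.add(normalized_alias[:-1])
--         elif not normalized_alias.endswith("s"):
--             aliases.add(f"{normalized_alias}s")
--
--     return aliases
--
-- def build_detector_prompt_class_lookup(
--     prompt_texts: list[str],
--     class_names: dict[int, str],
--     alias_map: dict[str, tuple[str, ...]] | None = None,
-- ) -> dict[int, list[int]]:
--     normalized_class_names = {
--         class_id: normalize_detector_label(class_name)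
--         for class_id, class_name in class_names.items()
--         if normalize_detector_label(class_name)
--     }
--     prompt_class_lookup: dict[int, list[int]] = {}
--     for prompt_index, prompt_text in enumerate(prompt_texts):
--         label = prompt_text_to_label(prompt_text)
--         aliases = detector_label_aliases(label, alias_map=alias_map)
--         if not aliases:
--             continue
--         for class_id, normalized_class_name in normalized_class_names.items():
--             if normalized_class_name in aliases:
--                 prompt_class_lookup.setdefault(class_id, []).append(prompt_index)
--     return prompt_class_lookup
-- ===== SOURCE B (Python) =====
-- def prompt_text_to_label(prompt_text: str) -> str:
--     label = " ".join(str(prompt_text).strip().split())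
--     if not label:
--         return ""
--
--     prefixes = (
--         "a real estate interior photo of ",
--         "a real estate exterior photo of ",
--         "a real estate photo of ",
--         "an interior photo of ",
--         "an exterior photo of ",
--         "an interior scene with ",
--         "an exterior scene with ",
--         "an ",
--         "a ",
--         "the ",
--     )
--     changed = True
--     while changed and label:
--         lowered = label.lower()
--         changed = False
--         for prefix in prefixes:
--             if lowered.startswith(prefix):
--                 label = label[len(prefix) :].strip()
--                 changed = True
--                 break
--
--     return label.strip(" .")
--
--
-- def normalize_detector_label(label: str) -> str:
--     return " ".join(str(label).strip().lower().replace("_", " ").split())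
--
--
-- def _variants(name):
--     """Singular/plural spellings of a non-empty normalized name ([] for '')."""
--     if not name:
--         return []
--     if name.endswith("s"):
--         return [name, name[:-1]] if len(name) > 3 else [name]
--     return [name, name + "s"]
--
--
-- def _alias_list(label, alias_map):
--     """All alias spellings for a label, first occurrence kept, as a list."""
--     n = normalize_detector_label(label)
--     if not n:
--         return []
--     raw = _variants(n)
--     for alias in (alias_map or {}).get(n, ()):
--         raw += _variants(normalize_detector_label(alias))
--     seen = []
--     for x in raw:
--         if x not in seen:
--             seen.append(x)
--     return seen
--
--
-- def build_detector_prompt_class_lookup(prompt_texts, class_names, alias_map=None):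
--     # Inverted index: normalized class name -> [(class position, class id), ...]
--     index = {}
--     for pos, (class_id, class_name) in enumerate(class_names.items()):
--         n = normalize_detector_label(class_name)
--         if n:
--             index.setdefault(n, []).append((pos, class_id))
--
--     result = {}
--     for i, text in enumerate(prompt_texts):
--         hits = sorted(
--             (pair
--              for a in _alias_list(prompt_text_to_label(text), alias_map)
--              for pair in index.get(a, [])),
--             key=lambda q: q[0],
--         )
--         for _, class_id in hits:
--             result.setdefault(class_id, []).append(i)
--     return result
-- ===== Notes on version B (the rewrite author's own statement) =====
-- stated objective: faster
-- what changed: B replaces A's per-prompt membership scan over every class with an inverted index from normalized class name to (class position, class id) pairs built once in a first pass, looks up only the few alias spellings per prompt (built as a deduplicated list of singular/plural variants instead of an incrementally-grown set) and sorts the hit pairs by class position to restore A's class order.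
import Mathlib
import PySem

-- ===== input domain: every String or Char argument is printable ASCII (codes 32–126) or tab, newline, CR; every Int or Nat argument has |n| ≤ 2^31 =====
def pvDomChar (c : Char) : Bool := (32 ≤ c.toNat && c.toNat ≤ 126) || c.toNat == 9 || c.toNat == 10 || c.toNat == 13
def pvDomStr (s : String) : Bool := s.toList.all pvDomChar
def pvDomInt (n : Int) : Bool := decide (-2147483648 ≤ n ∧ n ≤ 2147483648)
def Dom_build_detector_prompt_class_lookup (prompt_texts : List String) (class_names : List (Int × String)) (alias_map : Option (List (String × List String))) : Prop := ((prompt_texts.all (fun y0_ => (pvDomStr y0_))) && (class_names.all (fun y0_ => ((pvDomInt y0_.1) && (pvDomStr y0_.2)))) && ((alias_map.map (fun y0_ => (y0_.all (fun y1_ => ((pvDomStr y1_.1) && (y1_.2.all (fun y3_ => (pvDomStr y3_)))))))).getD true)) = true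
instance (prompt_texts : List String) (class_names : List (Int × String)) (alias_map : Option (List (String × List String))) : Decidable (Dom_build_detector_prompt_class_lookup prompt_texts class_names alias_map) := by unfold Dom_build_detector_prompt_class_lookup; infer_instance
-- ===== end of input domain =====

-- B replaces A's per-prompt scan over all classes by an inverted index (normalized
-- class name -> (position, class id) pairs) consulted per alias, with the alias set
-- built as a deduplicated list of singular/plural variants; objective: faster on many classes.

-- ===== PORT A =====
-- shared module helper: normalize_detector_label (called verbatim by both Pythons)
def normalize_detector_label (label : String) : String :=
  PySem.Str.join " " (PySem.Str.split₀ (PySem.Str.replace (PySem.Str.lower (PySem.Str.strip label)) "_" " "))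

def pv_prefixes : List String :=
  ["a real estate interior photo of ", "a real estate exterior photo of ",
   "a real estate photo of ", "an interior photo of ", "an exterior photo of ",
   "an interior scene with ", "an exterior scene with ", "an ", "a ", "the "]

-- the 'while changed and label' loop; each successful strip shortens label by ≥ 2,
-- so fuel = len(label) + 1 never runs out and the loop is exact
def pv_strip_loop (fuel : Nat) (label : String) : String :=
  match fuel with
  | 0 => label
  | fuel + 1 =>
    if label = "" then label
    else
      match pv_prefixes.find? (fun p => PySem.Str.startswith (PySem.Str.lower label) p) with
      | none => label
      | some p => pv_strip_loop fuel (PySem.Str.strip (PySem.Str.slice label (some (PySem.Str.len p)) none))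

-- shared module helper: prompt_text_to_label
def prompt_text_to_label (prompt_text : String) : String :=
  let label := PySem.Str.join " " (PySem.Str.split₀ (PySem.Str.strip prompt_text))
  if label = "" then ""
  else PySem.Str.stripChars (pv_strip_loop ((PySem.Str.len label).toNat + 1) label) " ."

-- A's helper: detector_label_aliases (f"{x}s" ported as join "" [x, "s"]; x[:-1] as slice)
def detector_label_aliases (label : String) (alias_map : Option (List (String × List String))) : PySem.Set String :=
  let normalized := normalize_detector_label label
  if normalized = "" then PySem.Set.empty
  else
    let aliases : PySem.Set String := PySem.Set.add PySem.Set.empty normalized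
    let aliases :=
      if PySem.Str.endswith normalized "s" && decide (3 < PySem.Str.len normalized) then
        PySem.Set.add aliases (PySem.Str.slice normalized none (some (-1)))
      else if !PySem.Str.endswith normalized "s" then
        PySem.Set.add aliases (PySem.Str.join "" [normalized, "s"])
      else aliases
    let amap := PySem.Dict.ofList (alias_map.getD [])
    (PySem.Dict.getD amap normalized []).foldl (fun aliases al =>
      let na := normalize_detector_label al
      if na = "" then aliases
      else
        let aliases := PySem.Set.add aliases na
        if PySem.Str.endswith na "s" && decide (3 < PySem.Str.len na) then
          PySem.Set.add aliases (PySem.Str.slice na none (some (-1)))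
        else if !PySem.Str.endswith na "s" then
          PySem.Set.add aliases (PySem.Str.join "" [na, "s"])
        else aliases) aliases

-- d.setdefault(k, []).append(i) is exactly d.modify k [] (· ++ [i])
def build_detector_prompt_class_lookup (prompt_texts : List String) (class_names : List (Int × String)) (alias_map : Option (List (String × List String))) : List (Int × List Int) :=
  let cn := PySem.Dict.ofList class_names
  let normalized : PySem.Dict Int String :=
    cn.items.foldl (fun acc r =>
      let n := normalize_detector_label r.2
      if n = "" then acc else acc.insert r.1 n) PySem.Dict.empty
  let result := (PySem.List.enumerate prompt_texts).foldl (fun d q =>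
      let aliases := detector_label_aliases (prompt_text_to_label q.2) alias_map
      if aliases = PySem.Set.empty then d
      else normalized.items.foldl (fun d r =>
          if PySem.Set.contains aliases r.2 then PySem.Dict.modify d r.1 [] (fun l => l ++ [q.1])
          else d) d) PySem.Dict.empty
  result.items

-- ===== PORT B =====
-- B's helper _variants: singular/plural spellings of a normalized name
def bVariants (n : String) : List String :=
  if n = "" then []
  else if PySem.Str.endswith n "s" then
    if 3 < PySem.Str.len n then [n, PySem.Str.slice n none (some (-1))] else [n]
  else [n, PySem.Str.join "" [n, "s"]]

-- B's 'for alias in …: raw += _variants(normalize_detector_label(alias))' loop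
def bNormAliases : List String → List String
  | [] => []
  | a :: rest => bVariants (normalize_detector_label a) ++ bNormAliases rest

-- B's hand-written first-occurrence dedup loop over 'seen'
def bDedup (acc : List String) : List String → List String
  | [] => acc
  | x :: xs => if acc.contains x then bDedup acc xs else bDedup (acc ++ [x]) xs

-- B's helper _alias_list
def bAliasList (label : String) (alias_map : Option (List (String × List String))) : List String :=
  let n := normalize_detector_label label
  if n = "" then []
  else bDedup [] (bVariants n ++ bNormAliases ((PySem.Dict.ofList (alias_map.getD [])).getD n []))

-- B pass 1: inverted index normalized name -> [(class position, class id), ...]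
def bIndex : List (Int × String) → Int → PySem.Dict String (List (Int × Int)) → PySem.Dict String (List (Int × Int))
  | [], _, idx => idx
  | r :: rest, pos, idx =>
    let n := normalize_detector_label r.2
    bIndex rest (pos + 1) (if n = "" then idx else idx.modify n [] (fun l => l ++ [(pos, r.1)]))

-- B's 'for _, class_id in hits: result.setdefault(class_id, []).append(i)'
def bAppend (i : Int) : List (Int × Int) → PySem.Dict Int (List Int) → PySem.Dict Int (List Int)
  | [], res => res
  | q :: qs, res => bAppend i qs (res.modify q.2 [] (fun l => l ++ [i]))

-- B pass 2 over the prompts, with the running prompt index i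
def bMain (idx : PySem.Dict String (List (Int × Int))) (am : Option (List (String × List String))) :
    Int → List String → PySem.Dict Int (List Int) → PySem.Dict Int (List Int)
  | _, [], res => res
  | i, t :: ts, res =>
    let hits := PySem.List.sorted ((bAliasList (prompt_text_to_label t) am).flatMap (fun a => idx.getD a [])) (fun q => q.1)
    bMain idx am (i + 1) ts (bAppend i hits res)

def build_detector_prompt_class_lookup_alt (prompt_texts : List String) (class_names : List (Int × String)) (alias_map : Option (List (String × List String))) : List (Int × List Int) :=
  (bMain (bIndex (PySem.Dict.ofList class_names).items 0 PySem.Dict.empty) alias_map 0 prompt_texts PySem.Dict.empty).items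

-- ===== PRECONDITION & SPEC =====
def Spec_build_detector_prompt_class_lookup (prompt_texts : List String) (class_names : List (Int × String)) (alias_map : Option (List (String × List String))) (out : List (Int × List Int)) : Prop := out = build_detector_prompt_class_lookup_alt prompt_texts class_names alias_map
instance (prompt_texts : List String) (class_names : List (Int × String)) (alias_map : Option (List (String × List String))) (out : List (Int × List Int)) : Decidable (Spec_build_detector_prompt_class_lookup prompt_texts class_names alias_map out) := by unfold Spec_build_detector_prompt_class_lookup; infer_instance

-- ===== CLAIM (what is proved, stated in full; the proofs are below) =====
def Claim_equal_build_detector_prompt_class_lookup : Prop := ∀ (prompt_texts : List String) (class_names : List (Int × String)) (alias_map : Option (List (String × List String))), Dom_build_detector_prompt_class_lookup prompt_texts class_names alias_map → Spec_build_detector_prompt_class_lookup prompt_texts class_names alias_map (build_detector_prompt_class_lookup prompt_texts class_names alias_map)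

-- ===== LEMMAS AND PROOFS =====

lemma pv_dedup_eq_update : ∀ (l acc : List String), bDedup acc l = PySem.Set.update acc l := by
  intro l
  induction l with
  | nil => intro acc; rfl
  | cons x xs ih =>
    intro acc
    rw [bDedup, PySem.Set.update_cons, PySem.Set.add_eq_ite]
    by_cases h : x ∈ acc
    · rw [if_pos (by simpa using h), if_pos h, ih]
    · rw [if_neg (by simpa using h), if_neg h, ih]

lemma pv_variants_update (s : PySem.Set String) (na : String) :
    PySem.Set.update s (bVariants na)
    = (if na = "" then s
       else
         if PySem.Str.endswith na "s" && decide (3 < PySem.Str.len na) then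
           PySem.Set.add (PySem.Set.add s na) (PySem.Str.slice na none (some (-1)))
         else if !PySem.Str.endswith na "s" then
           PySem.Set.add (PySem.Set.add s na) (PySem.Str.join "" [na, "s"])
         else PySem.Set.add s na) := by
  rw [bVariants]
  by_cases h : na = ""
  · rw [if_pos h, if_pos h, PySem.Set.update_nil]
  · rw [if_neg h, if_neg h]
    by_cases he : PySem.Str.endswith na "s" = true
    · by_cases hl : (3 : Int) < PySem.Str.len na
      · rw [if_pos he, if_pos hl, if_pos (by rw [he]; simpa using hl),
          PySem.Set.update_cons, PySem.Set.update_cons, PySem.Set.update_nil]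
      · rw [if_pos he, if_neg hl, if_neg (by rw [he]; simpa using hl),
          if_neg (by simpa using he), PySem.Set.update_cons, PySem.Set.update_nil]
    · have he' : PySem.Chars.endswith na.toList ['s'] = false := by simpa using he
      rw [if_neg he, if_neg (by simp [he']), if_pos (by simp [he']),
        PySem.Set.update_cons, PySem.Set.update_cons, PySem.Set.update_nil]

lemma pv_norm_aliases_fold : ∀ (l : List String) (s : PySem.Set String),
    l.foldl (fun (aliases : PySem.Set String) (al : String) =>
      if normalize_detector_label al = "" then aliases
      else
        if PySem.Str.endswith (normalize_detector_label al) "s" && decide (3 < PySem.Str.len (normalize_detector_label al)) then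
          PySem.Set.add (PySem.Set.add aliases (normalize_detector_label al)) (PySem.Str.slice (normalize_detector_label al) none (some (-1)))
        else if !PySem.Str.endswith (normalize_detector_label al) "s" then
          PySem.Set.add (PySem.Set.add aliases (normalize_detector_label al)) (PySem.Str.join "" [normalize_detector_label al, "s"])
        else PySem.Set.add aliases (normalize_detector_label al)) s
    = PySem.Set.update s (bNormAliases l) := by
  intro l
  induction l with
  | nil => intro s; rw [bNormAliases, PySem.Set.update_nil, List.foldl_nil]
  | cons a l ih =>
    intro s
    rw [List.foldl_cons, ih, bNormAliases, PySem.Set.update_append, pv_variants_update]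
lemma pv_alias_list_eq (label : String) (am : Option (List (String × List String))) :
    bAliasList label am = detector_label_aliases label am := by
  unfold bAliasList detector_label_aliases
  by_cases h : normalize_detector_label label = ""
  · simp only [h, if_true]; rfl
  · simp only [if_neg h]
    rw [pv_dedup_eq_update, PySem.Set.update_nil_left, PySem.Set.ofList_append,
      ← PySem.Set.update_nil_left, pv_variants_update, if_neg h, pv_norm_aliases_fold]
    rfl
lemma pv_index_eq_foldl : ∀ (l : List (Int × String)) (pos : Int) (idx : PySem.Dict String (List (Int × Int))),
    bIndex l pos idx
    = (PySem.List.enumerate l pos).foldl (fun idx q =>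
        if normalize_detector_label q.2.2 = "" then idx
        else idx.modify (normalize_detector_label q.2.2) [] (fun v => v ++ [(q.1, q.2.1)])) idx := by
  intro l
  induction l with
  | nil => intro pos idx; rfl
  | cons r l ih =>
    intro pos idx
    rw [bIndex, PySem.List.enumerate_cons, List.foldl_cons, ih]

lemma pv_getD_fold {α : Type} (key : α → String) (val : α → Int × Int) :
    ∀ (L : List α) (d : PySem.Dict String (List (Int × Int))) (a : String),
    (L.foldl (fun idx q => if key q = "" then idx
        else idx.modify (key q) [] (fun v => v ++ [val q])) d).getD a []
    = d.getD a [] ++ (L.filter (fun q => !(key q == "") && (key q == a))).map val := by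
  intro L
  induction L with
  | nil => intro d a; simp
  | cons x L ih =>
    intro d a
    rw [List.foldl_cons, List.filter_cons]
    by_cases h : key x = ""
    · rw [if_pos h, ih, if_neg (by simp [h])]
    · rw [if_neg h, ih]
      by_cases ha : key x = a
      · rw [if_pos (by simp [ha, ha ▸ h]), ← ha, PySem.Dict.getD_modify_self]
        simp
      · rw [if_neg (by simp [ha]), PySem.Dict.getD_modify, if_neg (fun hc => ha hc.symm)]
lemma pv_filter_or_perm {α : Type} (p q : α → Bool) :
    ∀ (l : List α), (∀ x ∈ l, ¬(p x = true ∧ q x = true)) →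
    (l.filter (fun x => p x || q x)).Perm (l.filter p ++ l.filter q) := by
  intro l
  induction l with
  | nil => intro _; simp
  | cons x l ih =>
    intro h
    have hx := h x (by simp)
    have hl : ∀ y ∈ l, ¬(p y = true ∧ q y = true) := fun y hy => h y (by simp [hy])
    by_cases hp : p x = true
    · have hq : q x = false := by
        by_cases hq' : q x = true
        · exact absurd ⟨hp, hq'⟩ hx
        · simpa using hq'
      simp only [List.filter_cons, hp, hq, Bool.true_or, if_true, List.cons_append]
      simpa using (ih hl).cons x
    · have hp' : p x = false := by simpa using hp
      by_cases hq : q x = true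
      · simp only [List.filter_cons, hp', hq, Bool.false_or, if_true]
        exact ((ih hl).cons x).trans List.perm_middle.symm
      · have hq' : q x = false := by simpa using hq
        simp only [List.filter_cons, hp', hq', Bool.false_or]
        exact ih hl

lemma pv_flatMap_perm {α β : Type} (key : α → String) (val : α → β) (L : List α) :
    ∀ (S : List String), S.Nodup →
    (S.flatMap (fun a => (L.filter (fun q => !(key q == "") && (key q == a))).map val)).Perm
      ((L.filter (fun q => !(key q == "") && PySem.Set.contains S (key q))).map val) := by
  intro S
  induction S with
  | nil => intro _; simp [PySem.Set.contains]
  | cons a S ih =>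
    intro hnd
    rw [List.nodup_cons] at hnd
    have hpred : (fun q : α => !(key q == "") && PySem.Set.contains (a :: S) (key q))
        = fun q => (!(key q == "") && (key q == a)) || (!(key q == "") && PySem.Set.contains S (key q)) := by
      funext q
      by_cases hqa : key q = a <;>
        · simp [PySem.Set.contains, hqa]
          try tauto
    have hdisj : ∀ x ∈ L, ¬((!(key x == "") && (key x == a)) = true ∧
        (!(key x == "") && PySem.Set.contains S (key x)) = true) := by
      intro x _ hcon
      obtain ⟨h1, h2⟩ := hcon
      simp only [Bool.and_eq_true, beq_iff_eq] at h1 h2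
      have hmem : a ∈ S := by
        have h3 := h2.2
        simp only [PySem.Set.contains, List.contains_iff_mem] at h3
        rwa [h1.2] at h3
      exact hnd.1 hmem
    have hsplit := pv_filter_or_perm _ _ L hdisj
    have hmap := hsplit.map val
    rw [List.map_append] at hmap
    rw [List.flatMap_cons, hpred]
    exact ((ih hnd.2).append_left _).trans hmap.symm
def pvNm (r : Int × String) : String := normalize_detector_label r.2

def pvNormA (nm : Int × String → String) (cns : List (Int × String)) : PySem.Dict Int String :=
  (PySem.Dict.ofList cns).items.foldl (fun acc r =>
    let n := nm r
    if n = "" then acc else acc.insert r.1 n) PySem.Dict.empty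

lemma pv_normA_items (nm : Int × String → String) (cns : List (Int × String)) :
    (pvNormA nm cns).items
    = ((PySem.Dict.ofList cns).items.filter (fun r => !(nm r == ""))).map
        (fun r => (r.1, nm r)) := by
  have hstep : (fun (acc : PySem.Dict Int String) (r : Int × String) =>
      let n := nm r
      if n = "" then acc else acc.insert r.1 n)
      = fun acc r => if (!(nm r == "")) = true then acc.insert r.1 (nm r) else acc := by
    funext acc r
    by_cases h : nm r = "" <;> simp [h]
  have hnd : (((PySem.Dict.ofList cns).items.filter
      (fun r => !(nm r == ""))).map (fun r : Int × String => r.1)).Nodup := by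
    have hk := PySem.Dict.nodup_keys_ofList (κ := Int) (ν := String) cns
    exact hk.sublist (List.Sublist.map _ List.filter_sublist)
  have h2 := PySem.Dict.items_foldl_insert_fresh (κ := Int) (ν := String)
      ((PySem.Dict.ofList cns).items.filter (fun r => !(nm r == "")))
      (fun r => r.1) (fun r => nm r) PySem.Dict.empty
      (fun a _ => PySem.Dict.contains_empty _) hnd
  unfold pvNormA
  rw [hstep, ← List.foldl_filter]
  simpa using h2

lemma pv_aliasList_nodup (label : String) (am : Option (List (String × List String))) :
    (bAliasList label am).Nodup := by
  unfold bAliasList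
  by_cases h : normalize_detector_label label = ""
  · simp [h]
  · simp only [if_neg h]
    rw [pv_dedup_eq_update, PySem.Set.update_nil_left]
    exact PySem.Set.nodup_ofList _

lemma pv_bAppend_eq (i : Int) : ∀ (l : List (Int × Int)) (res : PySem.Dict Int (List Int)),
    bAppend i l res
    = (l.map (fun q => q.2)).foldl (fun d c => d.modify c [] (fun v => v ++ [i])) res := by
  intro l
  induction l with
  | nil => intro res; rfl
  | cons q l ih => intro res; rw [bAppend, ih, List.map_cons, List.foldl_cons]

lemma pv_enum_keys (P : (Int × String) → Bool) :
    ∀ (l : List (Int × String)) (s : Int),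
    ((PySem.List.enumerate l s).filter (fun q => P q.2)).map (fun q => q.2.1)
    = (l.filter P).map (fun r => r.1) := by
  intro l
  induction l with
  | nil => intro s; rfl
  | cons r l ih =>
    intro s
    by_cases hP : P r = true
    · simp [PySem.List.enumerate_cons, hP, ih]
    · have hP' : P r = false := by simpa using hP
      simp [PySem.List.enumerate_cons, hP', ih]
def pvStepA (cns : List (Int × String)) (am : Option (List (String × List String)))
    (d : PySem.Dict Int (List Int)) (q : Int × String) : PySem.Dict Int (List Int) :=
  let aliases := detector_label_aliases (prompt_text_to_label q.2) am
  if aliases = PySem.Set.empty then d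
  else (pvNormA pvNm cns).items.foldl (fun d r =>
      if PySem.Set.contains aliases r.2 then PySem.Dict.modify d r.1 [] (fun l => l ++ [q.1])
      else d) d

def pvStepB (cns : List (Int × String)) (am : Option (List (String × List String)))
    (d : PySem.Dict Int (List Int)) (q : Int × String) : PySem.Dict Int (List Int) :=
  bAppend q.1
    (PySem.List.sorted
      ((bAliasList (prompt_text_to_label q.2) am).flatMap
        (fun a => (bIndex (PySem.Dict.ofList cns).items 0 PySem.Dict.empty).getD a []))
      (fun p => p.1)) d

lemma pv_target_pairwise (l : List (Int × String)) (p : (Int × (Int × String)) → Bool) (s : Int) :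
    (((PySem.List.enumerate l s).filter p).map (fun q => (q.1, q.2.1))).Pairwise
      (fun a b => a.1 < b.1) :=
  ((PySem.List.pairwise_lt_enumerate l s).filter p).map _ (fun _ _ h => h)

lemma pv_inner_eq (cns : List (Int × String)) (am : Option (List (String × List String)))
    (i : Int) (t : String) (d : PySem.Dict Int (List Int)) :
    pvStepA cns am d (i, t) = pvStepB cns am d (i, t) := by
  unfold pvStepA pvStepB
  dsimp only
  rw [← pv_alias_list_eq]
  by_cases hS0 : bAliasList (prompt_text_to_label t) am = PySem.Set.empty
  · rw [if_pos (by rw [hS0]), hS0]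
    rw [show PySem.List.sorted (List.flatMap (fun a => (bIndex (PySem.Dict.ofList cns).items 0 PySem.Dict.empty).getD a []) (PySem.Set.empty : List String)) (fun p : Int × Int => p.1) = [] from
      (PySem.List.sorted_eq_nil_iff _ _ _).mpr rfl]
    rfl
  · rw [if_neg hS0]
    have hS : (bAliasList (prompt_text_to_label t) am).Nodup := pv_aliasList_nodup _ _
    have hgetD : (fun a => (bIndex (PySem.Dict.ofList cns).items 0 PySem.Dict.empty).getD a [])
        = fun a => ((PySem.List.enumerate (PySem.Dict.ofList cns).items 0).filter
            (fun q => !(normalize_detector_label q.2.2 == "") && (normalize_detector_label q.2.2 == a))).map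
            (fun q => (q.1, q.2.1)) := by
      funext a
      rw [pv_index_eq_foldl]
      have h := pv_getD_fold (fun q : Int × (Int × String) => normalize_detector_label q.2.2)
        (fun q => (q.1, q.2.1)) (PySem.List.enumerate (PySem.Dict.ofList cns).items 0)
        PySem.Dict.empty a
      simpa using h
    have hmatched : PySem.List.sorted
        ((bAliasList (prompt_text_to_label t) am).flatMap
          (fun a => (bIndex (PySem.Dict.ofList cns).items 0 PySem.Dict.empty).getD a []))
        (fun p => p.1)
        = ((PySem.List.enumerate (PySem.Dict.ofList cns).items 0).filter
            (fun q => !(normalize_detector_label q.2.2 == "") &&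
              PySem.Set.contains (bAliasList (prompt_text_to_label t) am) (normalize_detector_label q.2.2))).map
            (fun q => (q.1, q.2.1)) := by
      rw [hgetD]
      exact PySem.List.sorted_eq_of_perm_of_pairwise_lt _ _ _
        (pv_flatMap_perm (fun q : Int × (Int × String) => normalize_detector_label q.2.2)
          (fun q => (q.1, q.2.1))
          (PySem.List.enumerate (PySem.Dict.ofList cns).items 0) _ hS).symm
        (pv_target_pairwise _ _ _)
    rw [hmatched, pv_bAppend_eq, List.map_map]
    dsimp only [Function.comp_def]
    rw [pv_enum_keys (fun r => !(normalize_detector_label r.2 == "") &&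
          PySem.Set.contains (bAliasList (prompt_text_to_label t) am) (normalize_detector_label r.2))
        ((PySem.Dict.ofList cns).items) 0]
    rw [pv_normA_items pvNm cns]
    rw [List.foldl_map, List.foldl_filter, List.foldl_map, List.foldl_filter]
    dsimp only
    apply PySem.List.foldl_congr_mem
    intro acc x _
    by_cases h1 : normalize_detector_label x.2 = "" <;> simp [pvNm, h1]
lemma pv_bMain_eq (cns : List (Int × String)) (am : Option (List (String × List String))) :
    ∀ (ts : List String) (i : Int) (res : PySem.Dict Int (List Int)),
    bMain (bIndex (PySem.Dict.ofList cns).items 0 PySem.Dict.empty) am i ts res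
    = (PySem.List.enumerate ts i).foldl (pvStepB cns am) res := by
  intro ts
  induction ts with
  | nil => intro i res; rfl
  | cons t ts ih =>
    intro i res
    rw [bMain, PySem.List.enumerate_cons, List.foldl_cons, ih]
    rfl

lemma pv_main (pts : List String) (cns : List (Int × String))
    (am : Option (List (String × List String))) :
    build_detector_prompt_class_lookup pts cns am
      = build_detector_prompt_class_lookup_alt pts cns am := by
  have hA : build_detector_prompt_class_lookup pts cns am
      = ((PySem.List.enumerate pts).foldl (pvStepA cns am) PySem.Dict.empty).items := rfl
  have hB : build_detector_prompt_class_lookup_alt pts cns am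
      = (bMain (bIndex (PySem.Dict.ofList cns).items 0 PySem.Dict.empty) am 0 pts PySem.Dict.empty).items := rfl
  rw [hA, hB, pv_bMain_eq]
  have hstep : pvStepA cns am = pvStepB cns am := by
    funext d q
    exact pv_inner_eq cns am q.1 q.2 d
  rw [hstep]

-- ===== VERDICT (by name: the statement is the Claim_ definition above) =====
theorem build_detector_prompt_class_lookup_spec : Claim_equal_build_detector_prompt_class_lookup := by
  unfold Claim_equal_build_detector_prompt_class_lookup Spec_build_detector_prompt_class_lookup
  intro pts cns am _
  exact pv_main pts cns am
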